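-- pv_equiv track=rewrite | github.com/0x4r35/CTF_solvers | n1^3.py | elementwise_cube_root
-- ===== SOURCE A (Python) =====
-- from typing import List, Tuple
--
-- P = 257
--
-- def elementwise_cube_root(v: List[int]) -> List[int]:
--     out = []
--     for a in v:
--         a = a % P
--         if a == 0:
--             out.append(0)
--         else:
--             out.append(pow(a, 171, P))  # since 3*171 ≡ 1 mod 256
--     return out
-- ===== SOURCE B (Python) =====
-- from typing import List, Tuple
--
-- P = 257
--
-- def elementwise_cube_root(v: List[int]) -> List[int]:
--     # Invert the (bijective) cube map mod the prime 257 once into a table,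
--     # then answer each element by a single lookup.
--     table = [0] * P
--     for x in range(P):
--         table[pow(x, 3, P)] = x
--     return [table[a % P] for a in v]
-- ===== Notes on version B (the rewrite author's own statement) =====
-- stated objective: faster
-- what changed: B inverts the forward cube map once into a 257-entry lookup table (table[x^3 mod 257] = x) and maps each element to a table lookup, instead of computing pow(a,171,257) per element with a zero special case.
import Mathlib
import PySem

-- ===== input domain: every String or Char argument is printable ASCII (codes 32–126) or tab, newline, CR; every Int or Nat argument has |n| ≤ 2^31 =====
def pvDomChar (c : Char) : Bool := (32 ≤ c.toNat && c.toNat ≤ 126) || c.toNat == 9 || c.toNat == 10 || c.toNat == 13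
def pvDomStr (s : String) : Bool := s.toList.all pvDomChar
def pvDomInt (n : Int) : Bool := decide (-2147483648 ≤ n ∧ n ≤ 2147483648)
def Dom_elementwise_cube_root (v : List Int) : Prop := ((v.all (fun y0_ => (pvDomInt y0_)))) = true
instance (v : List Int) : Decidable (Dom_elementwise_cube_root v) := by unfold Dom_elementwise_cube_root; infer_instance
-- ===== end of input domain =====

-- ===== PORT A =====
def elementwise_cube_root (v : List Int) : List Int :=
  v.foldl (fun out a =>
    let a := PySem.Int.mod a 257
    if a = 0 then out ++ [(0 : Int)]
    else out ++ [PySem.Int.powMod a 171 257]) []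

-- ===== PORT B =====
-- B builds the inverse-cube table once (table[pow(x,3,P)] = x) and answers each
-- element by one lookup. Python's table[a % P] is ported as getD with .toNat,
-- exact here since 0 ≤ a % 257 < 257 = the table's length.
def ecrTable : List Int :=
  (PySem.List.pyRange 0 257 1).foldl
    (fun t x => t.set (PySem.Int.powMod x 3 257).toNat x)
    (List.replicate 257 0)

def elementwise_cube_root_alt (v : List Int) : List Int :=
  v.map (fun a => ecrTable.getD (PySem.Int.mod a 257).toNat 0)

-- ===== PRECONDITION & SPEC =====
def Spec_elementwise_cube_root (v : List Int) (out : List Int) : Prop := out = elementwise_cube_root_alt v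
instance (v : List Int) (out : List Int) : Decidable (Spec_elementwise_cube_root v out) := by unfold Spec_elementwise_cube_root; infer_instance

-- ===== CLAIM (what is proved, stated in full; the proofs are below) =====
def Claim_equal_elementwise_cube_root : Prop := ∀ (v : List Int), Dom_elementwise_cube_root v → Spec_elementwise_cube_root v (elementwise_cube_root v)

-- ===== LEMMAS AND PROOFS =====

-- per-element value computed by A's loop body
def ecrA (a : Int) : Int :=
  if PySem.Int.mod a 257 = 0 then 0 else PySem.Int.powMod (PySem.Int.mod a 257) 171 257

-- A's fold with append-accumulator is the map of its per-element function
theorem ecr_foldl (v : List Int) (acc : List Int) :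
    v.foldl (fun out a =>
      let a := PySem.Int.mod a 257
      if a = 0 then out ++ [(0 : Int)]
      else out ++ [PySem.Int.powMod a 171 257]) acc = acc ++ v.map ecrA := by
  induction v generalizing acc with
  | nil => simp
  | cons x xs ih =>
      simp only [List.foldl_cons, List.map_cons, ih, ecrA]
      split_ifs <;> simp

-- the two per-element functions agree on every residue 0 ≤ r < 257
set_option maxRecDepth 100000 in
theorem ecr_table_key : ∀ r ∈ List.range 257,
    (if (r : Int) = 0 then (0 : Int) else PySem.Int.powMod (r : Int) 171 257)
      = ecrTable.getD r 0 := by decide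

theorem ecr_elem (a : Int) : ecrA a = ecrTable.getD (PySem.Int.mod a 257).toNat 0 := by
  have h0 : (0 : Int) ≤ PySem.Int.mod a 257 := PySem.Int.mod_nonneg a (by norm_num)
  have hlt : PySem.Int.mod a 257 < 257 := PySem.Int.mod_lt a (by norm_num)
  have hr : ((PySem.Int.mod a 257).toNat : Int) = PySem.Int.mod a 257 := Int.toNat_of_nonneg h0
  have hmem : (PySem.Int.mod a 257).toNat ∈ List.range 257 := by
    simp only [List.mem_range]; omega
  have := ecr_table_key _ hmem
  rw [hr] at this
  simpa [ecrA] using this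

-- ===== VERDICT (by name: the statement is the Claim_ definition above) =====
theorem elementwise_cube_root_spec : Claim_equal_elementwise_cube_root := by
  intro v _
  show elementwise_cube_root v = elementwise_cube_root_alt v
  unfold elementwise_cube_root elementwise_cube_root_alt
  rw [ecr_foldl]
  simp [List.map_congr_left fun a _ => ecr_elem a]
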